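-- pv_equiv track=rewrite | github.com/ALBEDO-TABAI/video-expert-analyzer-vnext | scripts/audiovisual/reporting/raw_prompt_adapter.py | _strip_low_value_sections
-- ===== SOURCE A (Python) =====
-- from typing import Any, Dict, List, Sequence
--
-- _DROP_SECTION_PREFIXES = (
--     "THEORETICAL ANCHORS",
--     "INPUT FORMAT",
--     "REFERENCES",
-- )
--
-- def _strip_low_value_sections(prompt_text: str) -> str:
--     kept: List[str] = []
--     dropping = False
--     for line in prompt_text.splitlines():
--         if line.startswith("## "):
--             heading = line[3:].strip()
--             dropping = any(heading.startswith(prefix) for prefix in _DROP_SECTION_PREFIXES)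
--         if not dropping:
--             kept.append(line)
--     return "\n".join(kept).strip()
-- ===== SOURCE B (Python) =====
-- _DROP_SECTION_PREFIXES = (
--     "THEORETICAL ANCHORS",
--     "INPUT FORMAT",
--     "REFERENCES",
-- )
--
-- def _strip_low_value_sections(prompt_text: str) -> str:
--     # Pass 1: partition the lines into consecutive groups; a new group starts
--     # at every line beginning with "## ", with a (possibly empty) headingless
--     # preamble group first.
--     groups = []
--     current = []
--     for line in prompt_text.splitlines():
--         if line.startswith("## "):
--             groups.append(current)
--             current = [line]
--         else:
--             current.append(line)
--     groups.append(current)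
--     # Pass 2: keep a group unless its heading starts with a dropped prefix.
--     kept = []
--     for g in groups:
--         if not g or not g[0].startswith("## ") or not any(
--             g[0][3:].strip().startswith(p) for p in _DROP_SECTION_PREFIXES
--         ):
--             kept.extend(g)
--     return "\n".join(kept).strip()
-- ===== Notes on version B (the rewrite author's own statement) =====
-- stated objective: alternative
-- what changed: Replaces the inline drop-flag toggle with a two-pass decomposition: first partition the lines into heading-delimited groups, then filter whole groups by their heading and concatenate the survivors.
import Mathlib
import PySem

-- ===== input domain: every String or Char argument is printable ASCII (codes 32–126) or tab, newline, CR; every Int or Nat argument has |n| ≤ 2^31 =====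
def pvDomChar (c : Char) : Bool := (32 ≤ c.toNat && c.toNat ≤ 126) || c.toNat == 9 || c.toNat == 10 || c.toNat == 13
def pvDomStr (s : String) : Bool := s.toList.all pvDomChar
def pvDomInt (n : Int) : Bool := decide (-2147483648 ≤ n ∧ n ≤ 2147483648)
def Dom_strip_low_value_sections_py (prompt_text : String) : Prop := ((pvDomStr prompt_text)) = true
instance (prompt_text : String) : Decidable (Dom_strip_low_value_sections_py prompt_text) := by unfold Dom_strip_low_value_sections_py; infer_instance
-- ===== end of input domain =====

-- B replaces A's inline drop-flag toggle by a two-pass decomposition: partition the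
-- lines into heading-delimited groups, then filter whole groups by their heading.

-- ===== PORT A =====
-- shared context: _DROP_SECTION_PREFIXES and the heading tests (used verbatim by both Pythons)
def pvDropPrefixes : List (List Char) :=
  ["THEORETICAL ANCHORS".toList, "INPUT FORMAT".toList, "REFERENCES".toList]

def pvIsHeading (line : List Char) : Bool := PySem.Chars.startswith line "## ".toList

-- any(heading.startswith(prefix) ...) with heading = line[3:].strip()
def pvDropHeading (line : List Char) : Bool :=
  let heading := PySem.Chars.strip (PySem.List.slice line (some 3) none)
  pvDropPrefixes.any (fun p => PySem.Chars.startswith heading p)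

-- the body of A's loop over (kept, dropping)
def stripA_step (st : List (List Char) × Bool) (line : List Char) :
    List (List Char) × Bool :=
  let dropping := if pvIsHeading line then pvDropHeading line else st.2
  (if dropping then st.1 else st.1 ++ [line], dropping)

def strip_low_value_sections_py (prompt_text : String) : String :=
  let kept := ((PySem.Chars.splitlines prompt_text.toList).foldl stripA_step ([], false)).1
  String.mk (PySem.Chars.strip (PySem.Chars.join "\n".toList kept))

-- ===== PORT B =====
-- pass 1 loop body: finished groups × current group
def stripB_step (st : List (List (List Char)) × List (List Char)) (line : List Char) :
    List (List (List Char)) × List (List Char) :=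
  if pvIsHeading line then (st.1 ++ [st.2], [line]) else (st.1, st.2 ++ [line])

-- pass 2 test: not g or not g[0].startswith("## ") or not any(...)
def pvKeepGroup (g : List (List Char)) : Bool :=
  match g with
  | [] => true
  | h :: _ => !(pvIsHeading h && pvDropHeading h)

def strip_low_value_sections_py_alt (prompt_text : String) : String :=
  let st := (PySem.Chars.splitlines prompt_text.toList).foldl stripB_step ([], [])
  let groups := st.1 ++ [st.2]
  let kept := (groups.filter pvKeepGroup).flatten
  String.mk (PySem.Chars.strip (PySem.Chars.join "\n".toList kept))

-- ===== PRECONDITION & SPEC =====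
def Spec_strip_low_value_sections_py (prompt_text : String) (out : String) : Prop := out = strip_low_value_sections_py_alt prompt_text
instance (prompt_text : String) (out : String) : Decidable (Spec_strip_low_value_sections_py prompt_text out) := by unfold Spec_strip_low_value_sections_py; infer_instance

-- ===== CLAIM (what is proved, stated in full; the proofs are below) =====
def Claim_equal_strip_low_value_sections_py : Prop := ∀ (prompt_text : String), Dom_strip_low_value_sections_py prompt_text → Spec_strip_low_value_sections_py prompt_text (strip_low_value_sections_py prompt_text)

-- ===== LEMMAS AND PROOFS =====

-- recursive characterisation of A's loop (output lines from flag d onward)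
def stripARec : List (List Char) → Bool → List (List Char)
  | [], _ => []
  | l :: rest, d =>
    let d' := if pvIsHeading l then pvDropHeading l else d
    (if d' then [] else [l]) ++ stripARec rest d'

theorem foldA_eq (lines : List (List Char)) (acc : List (List Char)) (d : Bool) :
    (lines.foldl stripA_step (acc, d)).1 = acc ++ stripARec lines d := by
  induction lines generalizing acc d with
  | nil => simp [stripARec]
  | cons l rest ih =>
    simp only [List.foldl_cons, stripARec, stripA_step, ih]
    cases h : (if pvIsHeading l then pvDropHeading l else d) <;> simp

-- recursive characterisation of B's pass 1 (groups produced from current group cur)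
def stripBGroups (cur : List (List Char)) : List (List Char) → List (List (List Char))
  | [] => [cur]
  | l :: rest =>
    if pvIsHeading l then cur :: stripBGroups [l] rest else stripBGroups (cur ++ [l]) rest

theorem foldB_eq (lines : List (List Char)) (gs : List (List (List Char)))
    (cur : List (List Char)) :
    (lines.foldl stripB_step (gs, cur)).1 ++ [(lines.foldl stripB_step (gs, cur)).2]
      = gs ++ stripBGroups cur lines := by
  induction lines generalizing gs cur with
  | nil => simp [stripBGroups]
  | cons l rest ih =>
    simp only [List.foldl_cons, stripBGroups, stripB_step]
    by_cases h : pvIsHeading l = true <;> simp [h, ih]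

theorem keep_extend (cur : List (List Char)) (x : List Char)
    (h : pvIsHeading x = false) : pvKeepGroup (cur ++ [x]) = pvKeepGroup cur := by
  cases cur <;> simp [pvKeepGroup, h]

-- pass 2 on the groups of pass 1 equals A's loop with flag = "current group dropped"
theorem groups_filter_eq (lines : List (List Char)) (cur : List (List Char)) :
    ((stripBGroups cur lines).filter pvKeepGroup).flatten
      = (if pvKeepGroup cur then cur else []) ++ stripARec lines (!pvKeepGroup cur) := by
  induction lines generalizing cur with
  | nil =>
    simp only [stripBGroups, stripARec]
    cases h : pvKeepGroup cur <;> simp [List.filter, h]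
  | cons l rest ih =>
    by_cases h : pvIsHeading l = true
    · simp only [stripBGroups, stripARec, h, if_true, List.filter_cons]
      cases hd : pvDropHeading l <;> cases hc : pvKeepGroup cur <;>
        simp [ih, pvKeepGroup, h, hd]
    · have h' : pvIsHeading l = false := by simpa using h
      simp only [stripBGroups, stripARec, h', if_false, Bool.false_eq_true, ih,
        keep_extend cur l h']
      cases hc : pvKeepGroup cur <;> simp

theorem kept_eq (lines : List (List Char)) :
    (lines.foldl stripA_step ([], false)).1
      = (((lines.foldl stripB_step ([], [])).1
            ++ [(lines.foldl stripB_step ([], [])).2]).filter pvKeepGroup).flatten := by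
  rw [foldB_eq, foldA_eq]
  simpa [pvKeepGroup] using (groups_filter_eq lines []).symm

-- ===== VERDICT (by name: the statement is the Claim_ definition above) =====
theorem strip_low_value_sections_py_spec : Claim_equal_strip_low_value_sections_py := by
  intro prompt_text _
  unfold Spec_strip_low_value_sections_py strip_low_value_sections_py
    strip_low_value_sections_py_alt
  dsimp only
  rw [kept_eq]
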